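-- pv_equiv track=rewrite | github.com/nnkim18/MM241-Assignment | student_submissions/s2311388_2312613_2312271_2313145/policy2311388_2312613_2312271_2313145.py | empty
-- ===== SOURCE A (Python) =====
-- def empty(list_prods): #Check if product has only one product (Will reset eviroment next time) ==> To call clear() if teacher not call
--     one = 0
--     for prod in list_prods:
--         if prod["quantity"] > 1:
--             return 0
--         if prod["quantity"] == 0:
--             continue
--         one = one + 1
--     if one == 1:
--         return 1
--     return 0
-- ===== SOURCE B (Python) =====
-- def empty(list_prods):
--     # Lazily pull the first two nonzero quantities; answer 1 iff exactly one exists and it is <= 1.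
--     nonzero = (prod["quantity"] for prod in list_prods if prod["quantity"] != 0)
--     first = next(nonzero, None)
--     if first is None or first > 1:
--         return 0
--     return 1 if next(nonzero, None) is None else 0
-- ===== Notes on version B (the rewrite author's own statement) =====
-- stated objective: alternative
-- what changed: Instead of scanning the whole list with an integer counter, B lazily pulls only the first two nonzero quantities from a generator and decides from those two values (1 iff exactly one nonzero exists and it is <= 1), stopping at the second nonzero where A keeps scanning.
import Mathlib
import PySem

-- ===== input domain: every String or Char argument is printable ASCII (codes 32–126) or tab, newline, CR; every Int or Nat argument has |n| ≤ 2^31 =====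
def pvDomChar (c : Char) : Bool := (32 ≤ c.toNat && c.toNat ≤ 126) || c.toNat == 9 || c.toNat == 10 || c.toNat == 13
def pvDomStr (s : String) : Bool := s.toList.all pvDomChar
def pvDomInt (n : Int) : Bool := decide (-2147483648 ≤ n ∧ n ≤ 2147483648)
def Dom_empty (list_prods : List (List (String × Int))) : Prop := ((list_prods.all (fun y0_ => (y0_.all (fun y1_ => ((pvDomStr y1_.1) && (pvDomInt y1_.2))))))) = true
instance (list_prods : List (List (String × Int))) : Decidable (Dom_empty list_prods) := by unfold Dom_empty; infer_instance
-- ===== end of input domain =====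

-- B replaces A's whole-list counter scan by lazily pulling just the first two nonzero
-- quantities and deciding from them; same asymptotic cost, different algorithm.

-- dict lookup prod["quantity"]: first match in the association list (none = KeyError)
def getQ (p : List (String × Int)) : Option Int := (PySem.Dict.mk p).get? "quantity"

-- ===== PORT A =====
-- A's for-loop with accumulator `one` and early `return 0`; on a missing key Python
-- raises KeyError (excluded by Pre_empty; the port returns 0 there, an arbitrary value).
def emptyGo : List (List (String × Int)) → Int → Int
  | [], one => if one = 1 then 1 else 0
  | p :: rest, one =>
    match getQ p with
    | none => 0
    | some q => if q > 1 then 0 else emptyGo rest (if q = 0 then one else one + 1)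

def empty (list_prods : List (List (String × Int))) : Int := emptyGo list_prods 0

-- ===== PORT B =====
-- `next` on Source B's generator of nonzero quantities: first nonzero quantity (or none
-- when exhausted) plus the unconsumed suffix. A missing "quantity" key raises KeyError
-- in Python (outside Pre_empty); the port yields (none, rest) there, an arbitrary value.
def nextNZ : List (List (String × Int)) → Option Int × List (List (String × Int))
  | [] => (none, [])
  | p :: rest =>
    match getQ p with
    | none => (none, rest)
    | some q => if q ≠ 0 then (some q, rest) else nextNZ rest

def empty_alt (list_prods : List (List (String × Int))) : Int :=
  match nextNZ list_prods with
  | (none, _) => 0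
  | (some first, rest) =>
    if first > 1 then 0
    else if (nextNZ rest).1 = none then 1 else 0

-- ===== PRECONDITION & SPEC =====
-- Pre_ is exactly the inputs on which Python's A returns: either every product carries
-- a "quantity" key, or some product with quantity > 1 (all keys present up to it)
-- triggers the early return before the first missing key (which would raise KeyError).
def Pre_empty (list_prods : List (List (String × Int))) : Prop :=
  (∀ p ∈ list_prods, "quantity" ∈ p.map Prod.fst) ∨
  (∃ i < list_prods.length, 1 < (getQ list_prods[i]!).getD 0 ∧
     ∀ j ≤ i, "quantity" ∈ (list_prods[j]!).map Prod.fst)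
instance (list_prods : List (List (String × Int))) : Decidable (Pre_empty list_prods) := by unfold Pre_empty; infer_instance
def pvWitness_empty : (List (List (String × Int))) := [[("quantity", 1)], [("quantity", 0)]]
def Spec_empty (list_prods : List (List (String × Int))) (out : Int) : Prop := out = empty_alt list_prods
instance (list_prods : List (List (String × Int))) (out : Int) : Decidable (Spec_empty list_prods out) := by unfold Spec_empty; infer_instance

-- ===== CLAIM (what is proved, stated in full; the proofs are below) =====
def Claim_equal_empty : Prop := ∀ (list_prods : List (List (String × Int))), Dom_empty list_prods → Pre_empty list_prods → Spec_empty list_prods (empty list_prods)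

-- ===== LEMMAS AND PROOFS =====

def qv (p : List (String × Int)) : Int := (getQ p).getD 0

theorem getQ_isSome (p : List (String × Int)) (h : "quantity" ∈ p.map Prod.fst) :
    (getQ p).isSome := by
  induction p with
  | nil => simp at h
  | cons kv rest ih =>
    obtain ⟨k, v⟩ := kv
    by_cases hk : k = "quantity"
    · simp [getQ, PySem.Dict.get?_mk_cons, hk]
    · simp only [List.map_cons, List.mem_cons] at h
      have hr := ih (h.resolve_left (by simpa using Ne.symm hk))
      simp only [getQ] at hr ⊢
      simpa [PySem.Dict.get?_mk_cons, hk] using hr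

theorem any_gt_filter (xs : List Int) :
    (xs.any (fun q => q > 1)) = ((xs.filter (fun q => q ≠ 0)).any (fun q => q > 1)) := by
  induction xs with
  | nil => rfl
  | cons a t ih =>
    by_cases h0 : a = 0 <;> simp [List.filter_cons, h0, ih] <;> omega

-- A's loop, characterised (under all keys present) via the list of quantities.
theorem emptyGo_eq (l : List (List (String × Int))) (one : Int)
    (h : ∀ p ∈ l, (getQ p).isSome) :
    emptyGo l one =
      if (l.map qv).any (fun q => q > 1) then 0
      else if one + (((l.map qv).filter (fun q => q ≠ 0)).length : Int) = 1 then 1 else 0 := by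
  induction l generalizing one with
  | nil => simp [emptyGo]
  | cons p rest ih =>
    obtain ⟨q, hq⟩ := Option.isSome_iff_exists.mp (h p (List.mem_cons_self ..))
    have hrest : ∀ x ∈ rest, (getQ x).isSome := fun x hx => h x (List.mem_cons_of_mem _ hx)
    simp only [emptyGo, hq, List.map_cons, List.any_cons, List.filter_cons, qv, Option.getD_some]
    by_cases h1 : q > 1
    · simp [h1]
    · rw [ih _ hrest]
      by_cases h0 : q = 0 <;>
        by_cases h2 : (rest.map qv).any (fun q => q > 1) <;>
        simp [qv, h0, h1, h2] <;> split_ifs <;> push_cast at * <;> omega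

-- A's loop returns 0 on the early-return branch (some quantity > 1, keys present up to it).
theorem emptyGo_zero (l : List (List (String × Int))) (one : Int) (i : Nat)
    (hi : i < l.length) (hgt : 1 < qv l[i]!)
    (hkeys : ∀ j ≤ i, "quantity" ∈ (l[j]!).map Prod.fst) :
    emptyGo l one = 0 := by
  induction l generalizing i one with
  | nil => simp at hi
  | cons p rest ih =>
    obtain ⟨q, hq⟩ := Option.isSome_iff_exists.mp
      (getQ_isSome p (by simpa using hkeys 0 (Nat.zero_le _)))
    simp only [emptyGo, hq]
    by_cases h1 : q > 1
    · simp [h1]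
    · simp only [if_neg h1]
      cases i with
      | zero => simp [qv, hq] at hgt; omega
      | succ i' =>
        exact ih _ i' (by simpa using hi) (by simpa using hgt)
          (fun j hj => by simpa using hkeys (j + 1) (Nat.succ_le_succ hj))

-- nextNZ under all keys present: head / tail of the nonzero quantities.
theorem nextNZ_allkeys (l : List (List (String × Int)))
    (h : ∀ p ∈ l, (getQ p).isSome) :
    (nextNZ l).1 = ((l.map qv).filter (fun q => q ≠ 0)).head? ∧
    ((nextNZ l).2.map qv).filter (fun q => q ≠ 0) = ((l.map qv).filter (fun q => q ≠ 0)).tail ∧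
    ∀ p ∈ (nextNZ l).2, (getQ p).isSome := by
  induction l with
  | nil => simp [nextNZ]
  | cons p rest ih =>
    obtain ⟨q, hq⟩ := Option.isSome_iff_exists.mp (h p (List.mem_cons_self ..))
    have hrest : ∀ x ∈ rest, (getQ x).isSome := fun x hx => h x (List.mem_cons_of_mem _ hx)
    by_cases h0 : q = 0
    · have := ih hrest
      simpa [nextNZ, hq, h0, qv, List.filter_cons] using this
    · refine ⟨by simp [nextNZ, hq, h0, qv], by simp [nextNZ, hq, h0, qv], ?_⟩
      intro x hx
      have h2 : (nextNZ (p :: rest)).2 = rest := by simp [nextNZ, hq, h0]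
      exact hrest x (h2 ▸ hx)

-- nextNZ reaches a nonzero quantity at a key-covered index: it yields some earlier
-- (or that) nonzero quantity and the suffix after it.
theorem nextNZ_reach (l : List (List (String × Int))) (i : Nat)
    (hi : i < l.length) (hnz : qv l[i]! ≠ 0)
    (hkeys : ∀ j ≤ i, "quantity" ∈ (l[j]!).map Prod.fst) :
    ∃ j ≤ i, (nextNZ l).1 = some (qv l[j]!) ∧ qv l[j]! ≠ 0 ∧
      (nextNZ l).2 = l.drop (j + 1) := by
  induction l generalizing i with
  | nil => simp at hi
  | cons p rest ih =>
    obtain ⟨q, hq⟩ := Option.isSome_iff_exists.mp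
      (getQ_isSome p (by simpa using hkeys 0 (Nat.zero_le _)))
    by_cases h0 : q = 0
    · cases i with
      | zero => simp [qv, hq, h0] at hnz
      | succ i' =>
        obtain ⟨j, hj, h1, h2, h3⟩ := ih i' (by simpa using hi) (by simpa using hnz)
          (fun j hj => by simpa using hkeys (j + 1) (Nat.succ_le_succ hj))
        exact ⟨j + 1, Nat.succ_le_succ hj,
          by simpa [nextNZ, hq, h0] using h1,
          by simpa using h2,
          by simpa [nextNZ, hq, h0] using h3⟩
    · exact ⟨0, Nat.zero_le _, by simp [nextNZ, hq, h0, qv], by simp [qv, hq, h0], by simp [nextNZ, hq, h0]⟩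

-- B returns 0 on A's early-return inputs (quantity > 1 at index i, keys up to i).
theorem empty_alt_zero (l : List (List (String × Int))) (i : Nat)
    (hi : i < l.length) (hgt : 1 < qv l[i]!)
    (hkeys : ∀ j ≤ i, "quantity" ∈ (l[j]!).map Prod.fst) :
    empty_alt l = 0 := by
  obtain ⟨j, hj, h1, h2, h3⟩ := nextNZ_reach l i hi (by omega) hkeys
  rcases hnz : nextNZ l with ⟨fst, rest⟩
  rw [hnz] at h1 h3
  replace h1 : fst = some (qv l[j]!) := h1
  replace h3 : rest = l.drop (j + 1) := h3
  subst h1 h3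
  unfold empty_alt
  rw [hnz]
  show (if qv l[j]! > 1 then (0 : Int) else if (nextNZ (l.drop (j + 1))).1 = none then 1 else 0) = 0
  by_cases hbig : qv l[j]! > 1
  · rw [if_pos hbig]
  · rw [if_neg hbig]
    -- j < i: the first nonzero is ≤ 1, so the one at i (in the suffix) is a second one
    have hji' : j < i := lt_of_le_of_ne hj (fun h => by rw [h] at hbig; omega)
    have hlen : i - (j + 1) < (l.drop (j + 1)).length := by
      rw [List.length_drop]; omega
    have hidx : (l.drop (j + 1))[i - (j + 1)]! = l[i]! := by
      rw [getElem!_pos (l.drop (j + 1)) (i - (j + 1)) hlen, getElem!_pos l i hi,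
        List.getElem_drop]
      congr 1; omega
    obtain ⟨k, hk, hk1, hk2, hk3⟩ := nextNZ_reach (l.drop (j + 1)) (i - (j + 1)) hlen
      (by rw [hidx]; omega)
      (fun m hm => by
        have hm' : m < (l.drop (j + 1)).length := by rw [List.length_drop] at hlen ⊢; omega
        have he : (l.drop (j + 1))[m]! = l[j + 1 + m]! := by
          rw [getElem!_pos (l.drop (j + 1)) m hm',
            getElem!_pos l (j + 1 + m) (by rw [List.length_drop] at hm'; omega),
            List.getElem_drop]
        rw [he]; exact hkeys (j + 1 + m) (by omega))
    rw [hk1]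
    simp

-- ===== VERDICT (by name: the statement is the Claim_ definition above) =====
theorem empty_spec : Claim_equal_empty := by
  intro l _ hpre
  unfold Spec_empty empty
  rcases hpre with hall | ⟨i, hi, hgt, hkeys⟩
  · have hsome : ∀ p ∈ l, (getQ p).isSome := fun p hp => getQ_isSome p (hall p hp)
    rw [emptyGo_eq l 0 hsome, any_gt_filter]
    obtain ⟨hb1, hb2, hb3⟩ := nextNZ_allkeys l hsome
    unfold empty_alt
    rcases hnz : nextNZ l with ⟨fst, rest⟩
    rw [hnz] at hb1 hb2 hb3
    obtain ⟨hc1, -, -⟩ := nextNZ_allkeys rest hb3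
    rw [hb2] at hc1
    rcases hf : (l.map qv).filter (fun q => q ≠ 0) with _ | ⟨a, t⟩
    · rw [hf] at hb1 ⊢
      simp only [List.head?_nil] at hb1
      subst hb1
      simp
    · rw [hf] at hb1 hc1 ⊢
      simp only [List.head?_cons] at hb1
      subst hb1
      by_cases ha : a > 1
      · simp [ha]
      · simp only [if_neg ha]
        rcases t with _ | ⟨b, t'⟩
        · simp only [List.tail_cons, List.head?_nil] at hc1
          simp [ha, hc1]
        · simp only [List.tail_cons, List.head?_cons] at hc1
          by_cases hany : ((l.map qv).filter (fun q => q ≠ 0)).any (fun q => q > 1) <;>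
            simp [hf, hany, hc1] <;> intros <;> push_cast <;> omega
  · rw [emptyGo_zero l 0 i hi hgt hkeys, empty_alt_zero l i hi hgt hkeys]
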